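-- pv_equiv track=rewrite | github.com/RakuLomis/traffic_encoder | .history/build_distilled_ptg_20260428142443.py | build_expert_definitions
-- ===== SOURCE A (Python) =====
-- from typing import Dict, List, Set, Tuple, Optional
--
-- def build_expert_definitions(
--     csv_fields: Set[str],
--     physical_fields: Set[str],
--     enabled_layers: Optional[List[str]],
--     use_ip_address: bool,
--     use_mac_address: bool,
--     use_port: bool,
-- ) -> Dict[str, Set[str]]:
--     eligible_fields = set(physical_fields)
--     eth_fields = {f for f in eligible_fields if f.startswith("eth.")}
--     ip_fields = {f for f in eligible_fields if f.startswith("ip.")}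
--     tcp_core_fields = {f for f in eligible_fields if f.startswith("tcp.") and "options" not in f}
--     port_fields = {"tcp.srcport", "tcp.dstport"}
--
--     if not use_mac_address:
--         eth_fields = eth_fields - {"eth.src", "eth.dst"}
--     if not use_ip_address:
--         ip_fields = ip_fields - {"ip.src", "ip.dst"}
--     if not use_port:
--         tcp_core_fields = tcp_core_fields - port_fields
--
--     expert_defs = {
--         "eth": eth_fields,
--         "ip": ip_fields,
--         "tcp_core": tcp_core_fields,
--         "tcp_options": {f for f in eligible_fields if f.startswith("tcp.options.")},
--         "tls_record": {f for f in eligible_fields if f.startswith("tls.record.")},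
--         "tls_handshake": {f for f in eligible_fields if f.startswith("tls.handshake.")},
--         "tls_x509": {f for f in eligible_fields if f.startswith("tls.x509")},
--     }
--
--     layer_to_experts = {
--         "eth": ["eth"],
--         "ip": ["ip"],
--         "tcp": ["tcp_core", "tcp_options"],
--         "tls": ["tls_record", "tls_handshake", "tls_x509"],
--     }
--     if enabled_layers is not None:
--         enabled = set()
--         for l in enabled_layers:
--             enabled.update(layer_to_experts.get(l, []))
--         expert_defs = {k: v for k, v in expert_defs.items() if k in enabled}
--
--     # Keep only fields actually present in CSV.
--     expert_defs = {k: set(v).intersection(csv_fields) for k, v in expert_defs.items()}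
--     return expert_defs
-- ===== SOURCE B (Python) =====
-- from typing import Dict, List, Set, Optional
--
-- # One pass over the eligible fields: an if/elif chain routes each field into
-- # the expert bucket it belongs to, instead of seven separate comprehensions.
-- def build_expert_definitions(
--     csv_fields: Set[str],
--     physical_fields: Set[str],
--     enabled_layers: Optional[List[str]],
--     use_ip_address: bool,
--     use_mac_address: bool,
--     use_port: bool,
-- ) -> Dict[str, Set[str]]:
--     buckets: Dict[str, Set[str]] = {
--         "eth": set(),
--         "ip": set(),
--         "tcp_core": set(),
--         "tcp_options": set(),
--         "tls_record": set(),
--         "tls_handshake": set(),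
--         "tls_x509": set(),
--     }
--     for f in set(physical_fields):
--         if f.startswith("tcp.options."):
--             buckets["tcp_options"].add(f)
--         elif f.startswith("tcp.") and "options" not in f:
--             buckets["tcp_core"].add(f)
--         elif f.startswith("eth."):
--             buckets["eth"].add(f)
--         elif f.startswith("ip."):
--             buckets["ip"].add(f)
--         elif f.startswith("tls.record."):
--             buckets["tls_record"].add(f)
--         elif f.startswith("tls.handshake."):
--             buckets["tls_handshake"].add(f)
--         elif f.startswith("tls.x509"):
--             buckets["tls_x509"].add(f)
--
--     if not use_mac_address:
--         buckets["eth"] -= {"eth.src", "eth.dst"}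
--     if not use_ip_address:
--         buckets["ip"] -= {"ip.src", "ip.dst"}
--     if not use_port:
--         buckets["tcp_core"] -= {"tcp.srcport", "tcp.dstport"}
--
--     if enabled_layers is not None:
--         layer_to_experts = {
--             "eth": ["eth"],
--             "ip": ["ip"],
--             "tcp": ["tcp_core", "tcp_options"],
--             "tls": ["tls_record", "tls_handshake", "tls_x509"],
--         }
--         enabled = set()
--         for l in enabled_layers:
--             enabled.update(layer_to_experts.get(l, []))
--         buckets = {k: v for k, v in buckets.items() if k in enabled}
--
--     return {k: v & csv_fields for k, v in buckets.items()}
-- ===== Notes on version B (the rewrite author's own statement) =====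
-- stated objective: alternative
-- what changed: The seven per-prefix set comprehensions over eligible_fields are replaced by a single pass that routes each field into a pre-initialized dict of seven buckets via an if/elif prefix chain; the flag subtractions, layer filtering and CSV intersection stay as in A.
import Mathlib
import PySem

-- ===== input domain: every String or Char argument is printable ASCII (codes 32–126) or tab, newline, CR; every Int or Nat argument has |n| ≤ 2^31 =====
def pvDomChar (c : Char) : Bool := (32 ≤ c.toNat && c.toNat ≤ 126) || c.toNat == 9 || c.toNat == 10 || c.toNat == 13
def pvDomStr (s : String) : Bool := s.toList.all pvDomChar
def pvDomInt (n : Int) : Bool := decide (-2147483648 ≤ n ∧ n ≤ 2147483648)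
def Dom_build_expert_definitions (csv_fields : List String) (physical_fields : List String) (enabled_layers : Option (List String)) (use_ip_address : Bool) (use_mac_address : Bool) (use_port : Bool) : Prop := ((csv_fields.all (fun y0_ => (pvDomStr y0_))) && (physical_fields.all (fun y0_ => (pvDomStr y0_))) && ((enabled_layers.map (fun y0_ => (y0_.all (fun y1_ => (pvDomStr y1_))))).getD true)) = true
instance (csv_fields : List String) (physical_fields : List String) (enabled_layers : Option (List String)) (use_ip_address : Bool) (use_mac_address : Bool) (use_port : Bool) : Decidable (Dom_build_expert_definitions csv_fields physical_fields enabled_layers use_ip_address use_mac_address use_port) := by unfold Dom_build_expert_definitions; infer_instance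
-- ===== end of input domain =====

-- B replaces A's seven per-prefix set comprehensions by ONE pass over the eligible fields
-- that routes each field into its expert bucket via an if/elif chain (objective: alternative decomposition).


-- ===== PORT A =====
-- A's layer_to_experts dict literal
def pvLayerToExperts : PySem.Dict String (List String) :=
  ((((PySem.Dict.empty).insert "eth" ["eth"]).insert "ip" ["ip"]).insert "tcp"
    ["tcp_core", "tcp_options"]).insert "tls" ["tls_record", "tls_handshake", "tls_x509"]

def build_expert_definitions (csv_fields : List String) (physical_fields : List String) (enabled_layers : Option (List String)) (use_ip_address : Bool) (use_mac_address : Bool) (use_port : Bool) : List (String × List String) :=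
  let eligible : PySem.Set String := PySem.Set.ofList physical_fields
  let eth_fields : PySem.Set String := PySem.Set.ofList (eligible.filter (fun f => PySem.Str.startswith f "eth."))
  let ip_fields : PySem.Set String := PySem.Set.ofList (eligible.filter (fun f => PySem.Str.startswith f "ip."))
  let tcp_core_fields : PySem.Set String := PySem.Set.ofList (eligible.filter (fun f => PySem.Str.startswith f "tcp." && !(PySem.Str.isIn "options" f)))
  let port_fields : PySem.Set String := ["tcp.srcport", "tcp.dstport"]
  let eth_fields := if !use_mac_address then PySem.Set.diff eth_fields ["eth.src", "eth.dst"] else eth_fields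
  let ip_fields := if !use_ip_address then PySem.Set.diff ip_fields ["ip.src", "ip.dst"] else ip_fields
  let tcp_core_fields := if !use_port then PySem.Set.diff tcp_core_fields port_fields else tcp_core_fields
  let expert_defs : List (String × List String) :=
    [("eth", eth_fields), ("ip", ip_fields), ("tcp_core", tcp_core_fields),
     ("tcp_options", PySem.Set.ofList (eligible.filter (fun f => PySem.Str.startswith f "tcp.options."))),
     ("tls_record", PySem.Set.ofList (eligible.filter (fun f => PySem.Str.startswith f "tls.record."))),
     ("tls_handshake", PySem.Set.ofList (eligible.filter (fun f => PySem.Str.startswith f "tls.handshake."))),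
     ("tls_x509", PySem.Set.ofList (eligible.filter (fun f => PySem.Str.startswith f "tls.x509")))]
  let expert_defs :=
    match enabled_layers with
    | none => expert_defs
    | some ls =>
      let enabled : PySem.Set String :=
        ls.foldl (fun s l => PySem.Set.update s (pvLayerToExperts.getD l [])) PySem.Set.empty
      expert_defs.filter (fun kv => PySem.Set.contains enabled kv.1)
  expert_defs.map (fun kv => (kv.1, PySem.Set.inter (PySem.Set.ofList kv.2) csv_fields))

-- ===== PORT B =====
-- B's fixed-key buckets dict, modelled as a structure with the seven keys in insertion order
structure PvBuckets where
  eth : List String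
  ip : List String
  tcp_core : List String
  tcp_options : List String
  tls_record : List String
  tls_handshake : List String
  tls_x509 : List String
deriving Repr, DecidableEq

-- the body of B's single classification loop (the if/elif chain)
def pvClassify (b : PvBuckets) (f : String) : PvBuckets :=
  if PySem.Str.startswith f "tcp.options." then { b with tcp_options := PySem.Set.add b.tcp_options f }
  else if PySem.Str.startswith f "tcp." && !(PySem.Str.isIn "options" f) then { b with tcp_core := PySem.Set.add b.tcp_core f }
  else if PySem.Str.startswith f "eth." then { b with eth := PySem.Set.add b.eth f }
  else if PySem.Str.startswith f "ip." then { b with ip := PySem.Set.add b.ip f }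
  else if PySem.Str.startswith f "tls.record." then { b with tls_record := PySem.Set.add b.tls_record f }
  else if PySem.Str.startswith f "tls.handshake." then { b with tls_handshake := PySem.Set.add b.tls_handshake f }
  else if PySem.Str.startswith f "tls.x509" then { b with tls_x509 := PySem.Set.add b.tls_x509 f }
  else b

-- B's layer_to_experts dict literal
def pvLayerToExpertsB : PySem.Dict String (List String) :=
  ((((PySem.Dict.empty).insert "eth" ["eth"]).insert "ip" ["ip"]).insert "tcp"
    ["tcp_core", "tcp_options"]).insert "tls" ["tls_record", "tls_handshake", "tls_x509"]

def build_expert_definitions_alt (csv_fields : List String) (physical_fields : List String) (enabled_layers : Option (List String)) (use_ip_address : Bool) (use_mac_address : Bool) (use_port : Bool) : List (String × List String) :=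
  let bk : PvBuckets :=
    (PySem.Set.ofList physical_fields).foldl pvClassify
      ⟨PySem.Set.empty, PySem.Set.empty, PySem.Set.empty, PySem.Set.empty,
       PySem.Set.empty, PySem.Set.empty, PySem.Set.empty⟩
  let bkEth := if !use_mac_address then PySem.Set.diff bk.eth ["eth.src", "eth.dst"] else bk.eth
  let bkIp := if !use_ip_address then PySem.Set.diff bk.ip ["ip.src", "ip.dst"] else bk.ip
  let bkTcpCore := if !use_port then PySem.Set.diff bk.tcp_core ["tcp.srcport", "tcp.dstport"] else bk.tcp_core
  let buckets : List (String × List String) :=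
    [("eth", bkEth), ("ip", bkIp), ("tcp_core", bkTcpCore), ("tcp_options", bk.tcp_options),
     ("tls_record", bk.tls_record), ("tls_handshake", bk.tls_handshake), ("tls_x509", bk.tls_x509)]
  let buckets :=
    match enabled_layers with
    | none => buckets
    | some ls =>
      let enabled : PySem.Set String :=
        ls.foldl (fun s l => PySem.Set.update s (pvLayerToExpertsB.getD l [])) PySem.Set.empty
      buckets.filter (fun kv => PySem.Set.contains enabled kv.1)
  buckets.map (fun kv => (kv.1, PySem.Set.inter kv.2 csv_fields))

-- ===== PRECONDITION & SPEC =====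
def Spec_build_expert_definitions (csv_fields : List String) (physical_fields : List String) (enabled_layers : Option (List String)) (use_ip_address : Bool) (use_mac_address : Bool) (use_port : Bool) (out : List (String × List String)) : Prop := out = build_expert_definitions_alt csv_fields physical_fields enabled_layers use_ip_address use_mac_address use_port
instance (csv_fields : List String) (physical_fields : List String) (enabled_layers : Option (List String)) (use_ip_address : Bool) (use_mac_address : Bool) (use_port : Bool) (out : List (String × List String)) : Decidable (Spec_build_expert_definitions csv_fields physical_fields enabled_layers use_ip_address use_mac_address use_port out) := by unfold Spec_build_expert_definitions; infer_instance

-- ===== CLAIM (what is proved, stated in full; the proofs are below) =====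
def Claim_equal_build_expert_definitions : Prop := ∀ (csv_fields : List String) (physical_fields : List String) (enabled_layers : Option (List String)) (use_ip_address : Bool) (use_mac_address : Bool) (use_port : Bool), Dom_build_expert_definitions csv_fields physical_fields enabled_layers use_ip_address use_mac_address use_port → Spec_build_expert_definitions csv_fields physical_fields enabled_layers use_ip_address use_mac_address use_port (build_expert_definitions csv_fields physical_fields enabled_layers use_ip_address use_mac_address use_port)

-- ===== LEMMAS AND PROOFS =====

-- two incomparable literal prefixes cannot both start the same string
theorem pv_sw_excl {s p q : List Char}
    (h : PySem.Chars.startswith s p = true) (h1 : ¬ p <+: q) (h2 : ¬ q <+: p) :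
    PySem.Chars.startswith s q = false := by
  by_contra hc
  rw [Bool.not_eq_false, PySem.Chars.startswith_iff] at hc
  rw [PySem.Chars.startswith_iff] at h
  rcases List.prefix_or_prefix_of_prefix h hc with h' | h'
  · exact h1 h'
  · exact h2 h'

theorem pv_swStr_excl (f : String) (p q : String)
    (h : PySem.Str.startswith f p = true)
    (h1 : ¬ p.toList <+: q.toList) (h2 : ¬ q.toList <+: p.toList) :
    PySem.Str.startswith f q = false := by
  simp only [PySem.Str.startswith_eq] at h ⊢
  exact pv_sw_excl h h1 h2

-- a field starting with "tcp.options." contains "options"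
theorem pv_optionsIn (f : String)
    (h : PySem.Str.startswith f "tcp.options." = true) :
    PySem.Str.isIn "options" f = true := by
  rw [PySem.Str.isIn_iff_infix]
  simp only [PySem.Str.startswith_eq] at h
  rw [PySem.Chars.startswith_iff] at h
  have hi : "options".toList <:+: "tcp.options.".toList := by decide
  exact hi.trans h.isInfix

-- the single classification pass computes exactly A's seven filters
theorem pv_classify_fold (l : List String) (b : PvBuckets)
    (hnd : l.Nodup)
    (h : ∀ x ∈ l, x ∉ b.eth ∧ x ∉ b.ip ∧ x ∉ b.tcp_core ∧ x ∉ b.tcp_options ∧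
         x ∉ b.tls_record ∧ x ∉ b.tls_handshake ∧ x ∉ b.tls_x509) :
    l.foldl pvClassify b =
      ⟨ b.eth ++ l.filter (fun f => PySem.Str.startswith f "eth."),
        b.ip ++ l.filter (fun f => PySem.Str.startswith f "ip."),
        b.tcp_core ++ l.filter (fun f => PySem.Str.startswith f "tcp." && !(PySem.Str.isIn "options" f)),
        b.tcp_options ++ l.filter (fun f => PySem.Str.startswith f "tcp.options."),
        b.tls_record ++ l.filter (fun f => PySem.Str.startswith f "tls.record."),
        b.tls_handshake ++ l.filter (fun f => PySem.Str.startswith f "tls.handshake."),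
        b.tls_x509 ++ l.filter (fun f => PySem.Str.startswith f "tls.x509") ⟩ := by
  induction l generalizing b with
  | nil => simp
  | cons f rest ih =>
    rw [List.nodup_cons] at hnd
    obtain ⟨hf, hrest⟩ := hnd
    have hfb := h f (List.mem_cons_self ..)
    have hnext : ∀ (b' : PvBuckets),
        b'.eth = b.eth ∨ b'.eth = b.eth ++ [f] →
        b'.ip = b.ip ∨ b'.ip = b.ip ++ [f] →
        b'.tcp_core = b.tcp_core ∨ b'.tcp_core = b.tcp_core ++ [f] →
        b'.tcp_options = b.tcp_options ∨ b'.tcp_options = b.tcp_options ++ [f] →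
        b'.tls_record = b.tls_record ∨ b'.tls_record = b.tls_record ++ [f] →
        b'.tls_handshake = b.tls_handshake ∨ b'.tls_handshake = b.tls_handshake ++ [f] →
        b'.tls_x509 = b.tls_x509 ∨ b'.tls_x509 = b.tls_x509 ++ [f] →
        ∀ x ∈ rest, x ∉ b'.eth ∧ x ∉ b'.ip ∧ x ∉ b'.tcp_core ∧ x ∉ b'.tcp_options ∧
          x ∉ b'.tls_record ∧ x ∉ b'.tls_handshake ∧ x ∉ b'.tls_x509 := by
      intro b' e1 e2 e3 e4 e5 e6 e7 x hx
      have hxf : x ≠ f := by rintro rfl; exact hf hx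
      have hxb := h x (List.mem_cons_of_mem _ hx)
      have key : ∀ {ys zs : List String}, x ∉ ys → (zs = ys ∨ zs = ys ++ [f]) → x ∉ zs := by
        rintro ys zs hys (rfl | rfl)
        · exact hys
        · simp [hys, hxf]
      exact ⟨key hxb.1 e1, key hxb.2.1 e2, key hxb.2.2.1 e3, key hxb.2.2.2.1 e4,
        key hxb.2.2.2.2.1 e5, key hxb.2.2.2.2.2.1 e6, key hxb.2.2.2.2.2.2 e7⟩
    by_cases h1 : PySem.Str.startswith f "tcp.options." = true
    · have hin := pv_optionsIn f h1
      have e3 := pv_swStr_excl f "tcp.options." "eth." h1 (by decide) (by decide)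
      have e4 := pv_swStr_excl f "tcp.options." "ip." h1 (by decide) (by decide)
      have e5 := pv_swStr_excl f "tcp.options." "tls.record." h1 (by decide) (by decide)
      have e6 := pv_swStr_excl f "tcp.options." "tls.handshake." h1 (by decide) (by decide)
      have e7 := pv_swStr_excl f "tcp.options." "tls.x509" h1 (by decide) (by decide)
      simp only [PySem.Str.startswith_eq, PySem.Str.isIn_eq] at h1 hin e3 e4 e5 e6 e7
      have hc : pvClassify b f = (⟨b.eth, b.ip, b.tcp_core, b.tcp_options ++ [f], b.tls_record, b.tls_handshake, b.tls_x509⟩ : PvBuckets) := by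
        unfold pvClassify
        simp only [PySem.Str.startswith_eq, PySem.Str.isIn_eq]
        rw [if_pos h1, PySem.Set.add_of_not_mem hfb.2.2.2.1]
      rw [List.foldl_cons, hc, ih (⟨b.eth, b.ip, b.tcp_core, b.tcp_options ++ [f], b.tls_record, b.tls_handshake, b.tls_x509⟩ : PvBuckets) hrest (hnext (⟨b.eth, b.ip, b.tcp_core, b.tcp_options ++ [f], b.tls_record, b.tls_handshake, b.tls_x509⟩ : PvBuckets) (Or.inl rfl) (Or.inl rfl) (Or.inl rfl) (Or.inr rfl) (Or.inl rfl) (Or.inl rfl) (Or.inl rfl))]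
      clear hnext ih h hfb hf
      simp_all [List.append_assoc]
    by_cases h2 : (PySem.Str.startswith f "tcp." && !(PySem.Str.isIn "options" f)) = true
    · have htcp : PySem.Str.startswith f "tcp." = true := ((Bool.and_eq_true _ _).mp h2).1
      have e3 := pv_swStr_excl f "tcp." "eth." htcp (by decide) (by decide)
      have e4 := pv_swStr_excl f "tcp." "ip." htcp (by decide) (by decide)
      have e5 := pv_swStr_excl f "tcp." "tls.record." htcp (by decide) (by decide)
      have e6 := pv_swStr_excl f "tcp." "tls.handshake." htcp (by decide) (by decide)
      have e7 := pv_swStr_excl f "tcp." "tls.x509" htcp (by decide) (by decide)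
      simp only [PySem.Str.startswith_eq, PySem.Str.isIn_eq] at h1 h2 e3 e4 e5 e6 e7
      have hc : pvClassify b f = (⟨b.eth, b.ip, b.tcp_core ++ [f], b.tcp_options, b.tls_record, b.tls_handshake, b.tls_x509⟩ : PvBuckets) := by
        unfold pvClassify
        simp only [PySem.Str.startswith_eq, PySem.Str.isIn_eq]
        rw [if_neg h1, if_pos h2, PySem.Set.add_of_not_mem hfb.2.2.1]
      rw [List.foldl_cons, hc, ih (⟨b.eth, b.ip, b.tcp_core ++ [f], b.tcp_options, b.tls_record, b.tls_handshake, b.tls_x509⟩ : PvBuckets) hrest (hnext (⟨b.eth, b.ip, b.tcp_core ++ [f], b.tcp_options, b.tls_record, b.tls_handshake, b.tls_x509⟩ : PvBuckets) (Or.inl rfl) (Or.inl rfl) (Or.inr rfl) (Or.inl rfl) (Or.inl rfl) (Or.inl rfl) (Or.inl rfl))]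
      clear hnext ih h hfb hf
      simp_all [List.append_assoc]
    by_cases h3 : PySem.Str.startswith f "eth." = true
    · have etcp := pv_swStr_excl f "eth." "tcp." h3 (by decide) (by decide)
      have e4 := pv_swStr_excl f "eth." "ip." h3 (by decide) (by decide)
      have e5 := pv_swStr_excl f "eth." "tls.record." h3 (by decide) (by decide)
      have e6 := pv_swStr_excl f "eth." "tls.handshake." h3 (by decide) (by decide)
      have e7 := pv_swStr_excl f "eth." "tls.x509" h3 (by decide) (by decide)
      simp only [PySem.Str.startswith_eq, PySem.Str.isIn_eq] at h1 h2 h3 etcp e4 e5 e6 e7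
      have hc : pvClassify b f = (⟨b.eth ++ [f], b.ip, b.tcp_core, b.tcp_options, b.tls_record, b.tls_handshake, b.tls_x509⟩ : PvBuckets) := by
        unfold pvClassify
        simp only [PySem.Str.startswith_eq, PySem.Str.isIn_eq]
        rw [if_neg h1, if_neg h2, if_pos h3, PySem.Set.add_of_not_mem hfb.1]
      rw [List.foldl_cons, hc, ih (⟨b.eth ++ [f], b.ip, b.tcp_core, b.tcp_options, b.tls_record, b.tls_handshake, b.tls_x509⟩ : PvBuckets) hrest (hnext (⟨b.eth ++ [f], b.ip, b.tcp_core, b.tcp_options, b.tls_record, b.tls_handshake, b.tls_x509⟩ : PvBuckets) (Or.inr rfl) (Or.inl rfl) (Or.inl rfl) (Or.inl rfl) (Or.inl rfl) (Or.inl rfl) (Or.inl rfl))]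
      clear hnext ih h hfb hf
      simp_all [List.append_assoc]
    by_cases h4 : PySem.Str.startswith f "ip." = true
    · have etcp := pv_swStr_excl f "ip." "tcp." h4 (by decide) (by decide)
      have e5 := pv_swStr_excl f "ip." "tls.record." h4 (by decide) (by decide)
      have e6 := pv_swStr_excl f "ip." "tls.handshake." h4 (by decide) (by decide)
      have e7 := pv_swStr_excl f "ip." "tls.x509" h4 (by decide) (by decide)
      simp only [PySem.Str.startswith_eq, PySem.Str.isIn_eq] at h1 h2 h3 h4 etcp e5 e6 e7
      have hc : pvClassify b f = (⟨b.eth, b.ip ++ [f], b.tcp_core, b.tcp_options, b.tls_record, b.tls_handshake, b.tls_x509⟩ : PvBuckets) := by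
        unfold pvClassify
        simp only [PySem.Str.startswith_eq, PySem.Str.isIn_eq]
        rw [if_neg h1, if_neg h2, if_neg h3, if_pos h4, PySem.Set.add_of_not_mem hfb.2.1]
      rw [List.foldl_cons, hc, ih (⟨b.eth, b.ip ++ [f], b.tcp_core, b.tcp_options, b.tls_record, b.tls_handshake, b.tls_x509⟩ : PvBuckets) hrest (hnext (⟨b.eth, b.ip ++ [f], b.tcp_core, b.tcp_options, b.tls_record, b.tls_handshake, b.tls_x509⟩ : PvBuckets) (Or.inl rfl) (Or.inr rfl) (Or.inl rfl) (Or.inl rfl) (Or.inl rfl) (Or.inl rfl) (Or.inl rfl))]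
      clear hnext ih h hfb hf
      simp_all [List.append_assoc]
    by_cases h5 : PySem.Str.startswith f "tls.record." = true
    · have etcp := pv_swStr_excl f "tls.record." "tcp." h5 (by decide) (by decide)
      have e6 := pv_swStr_excl f "tls.record." "tls.handshake." h5 (by decide) (by decide)
      have e7 := pv_swStr_excl f "tls.record." "tls.x509" h5 (by decide) (by decide)
      simp only [PySem.Str.startswith_eq, PySem.Str.isIn_eq] at h1 h2 h3 h4 h5 etcp e6 e7
      have hc : pvClassify b f = (⟨b.eth, b.ip, b.tcp_core, b.tcp_options, b.tls_record ++ [f], b.tls_handshake, b.tls_x509⟩ : PvBuckets) := by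
        unfold pvClassify
        simp only [PySem.Str.startswith_eq, PySem.Str.isIn_eq]
        rw [if_neg h1, if_neg h2, if_neg h3, if_neg h4, if_pos h5, PySem.Set.add_of_not_mem hfb.2.2.2.2.1]
      rw [List.foldl_cons, hc, ih (⟨b.eth, b.ip, b.tcp_core, b.tcp_options, b.tls_record ++ [f], b.tls_handshake, b.tls_x509⟩ : PvBuckets) hrest (hnext (⟨b.eth, b.ip, b.tcp_core, b.tcp_options, b.tls_record ++ [f], b.tls_handshake, b.tls_x509⟩ : PvBuckets) (Or.inl rfl) (Or.inl rfl) (Or.inl rfl) (Or.inl rfl) (Or.inr rfl) (Or.inl rfl) (Or.inl rfl))]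
      clear hnext ih h hfb hf
      simp_all [List.append_assoc]
    by_cases h6 : PySem.Str.startswith f "tls.handshake." = true
    · have etcp := pv_swStr_excl f "tls.handshake." "tcp." h6 (by decide) (by decide)
      have e7 := pv_swStr_excl f "tls.handshake." "tls.x509" h6 (by decide) (by decide)
      simp only [PySem.Str.startswith_eq, PySem.Str.isIn_eq] at h1 h2 h3 h4 h5 h6 etcp e7
      have hc : pvClassify b f = (⟨b.eth, b.ip, b.tcp_core, b.tcp_options, b.tls_record, b.tls_handshake ++ [f], b.tls_x509⟩ : PvBuckets) := by
        unfold pvClassify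
        simp only [PySem.Str.startswith_eq, PySem.Str.isIn_eq]
        rw [if_neg h1, if_neg h2, if_neg h3, if_neg h4, if_neg h5, if_pos h6, PySem.Set.add_of_not_mem hfb.2.2.2.2.2.1]
      rw [List.foldl_cons, hc, ih (⟨b.eth, b.ip, b.tcp_core, b.tcp_options, b.tls_record, b.tls_handshake ++ [f], b.tls_x509⟩ : PvBuckets) hrest (hnext (⟨b.eth, b.ip, b.tcp_core, b.tcp_options, b.tls_record, b.tls_handshake ++ [f], b.tls_x509⟩ : PvBuckets) (Or.inl rfl) (Or.inl rfl) (Or.inl rfl) (Or.inl rfl) (Or.inl rfl) (Or.inr rfl) (Or.inl rfl))]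
      clear hnext ih h hfb hf
      simp_all [List.append_assoc]
    by_cases h7 : PySem.Str.startswith f "tls.x509" = true
    · have etcp := pv_swStr_excl f "tls.x509" "tcp." h7 (by decide) (by decide)
      simp only [PySem.Str.startswith_eq, PySem.Str.isIn_eq] at h1 h2 h3 h4 h5 h6 h7 etcp
      have hc : pvClassify b f = (⟨b.eth, b.ip, b.tcp_core, b.tcp_options, b.tls_record, b.tls_handshake, b.tls_x509 ++ [f]⟩ : PvBuckets) := by
        unfold pvClassify
        simp only [PySem.Str.startswith_eq, PySem.Str.isIn_eq]
        rw [if_neg h1, if_neg h2, if_neg h3, if_neg h4, if_neg h5, if_neg h6, if_pos h7, PySem.Set.add_of_not_mem hfb.2.2.2.2.2.2]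
      rw [List.foldl_cons, hc, ih (⟨b.eth, b.ip, b.tcp_core, b.tcp_options, b.tls_record, b.tls_handshake, b.tls_x509 ++ [f]⟩ : PvBuckets) hrest (hnext (⟨b.eth, b.ip, b.tcp_core, b.tcp_options, b.tls_record, b.tls_handshake, b.tls_x509 ++ [f]⟩ : PvBuckets) (Or.inl rfl) (Or.inl rfl) (Or.inl rfl) (Or.inl rfl) (Or.inl rfl) (Or.inl rfl) (Or.inr rfl))]
      clear hnext ih h hfb hf
      simp_all [List.append_assoc]
    simp only [PySem.Str.startswith_eq, PySem.Str.isIn_eq] at h1 h2 h3 h4 h5 h6 h7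
    have hc : pvClassify b f = b := by
      unfold pvClassify
      simp only [PySem.Str.startswith_eq, PySem.Str.isIn_eq]
      rw [if_neg h1, if_neg h2, if_neg h3, if_neg h4, if_neg h5, if_neg h6, if_neg h7]
    rw [List.foldl_cons, hc, ih b hrest (hnext b (Or.inl rfl) (Or.inl rfl) (Or.inl rfl) (Or.inl rfl) (Or.inl rfl) (Or.inl rfl) (Or.inl rfl))]
    clear hnext ih h hfb hf
    simp_all [List.append_assoc]

-- ===== VERDICT (by name: the statement is the Claim_ definition above) =====
theorem build_expert_definitions_spec : Claim_equal_build_expert_definitions := by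
  intro csv pf el uip umac uport _
  unfold Spec_build_expert_definitions build_expert_definitions build_expert_definitions_alt
  have hnd : (PySem.Set.ofList pf).Nodup := PySem.Set.nodup_ofList pf
  rw [pv_classify_fold _ _ hnd (by intro x hx; simp [PySem.Set.empty])]
  have hof : ∀ (p : String → Bool),
      PySem.Set.ofList ((PySem.Set.ofList pf).filter p) = (PySem.Set.ofList pf).filter p :=
    fun p => PySem.Set.ofList_eq_self_of_nodup _ (hnd.filter p)
  have hL : pvLayerToExpertsB = pvLayerToExperts := rfl
  simp only [hof, hL, PySem.Set.empty, List.nil_append]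
  have key : ∀ (X : List (String × List String)), (∀ kv ∈ X, kv.2.Nodup) →
      X.map (fun kv => (kv.1, PySem.Set.inter (PySem.Set.ofList kv.2) csv)) =
      X.map (fun kv => (kv.1, PySem.Set.inter kv.2 csv)) := by
    intro X hX
    apply List.map_congr_left
    intro kv hkv
    rw [PySem.Set.ofList_eq_self_of_nodup _ (hX kv hkv)]
  rcases el with _ | ls
  · apply key
    intro kv hkv
    simp only [List.mem_cons, List.not_mem_nil, or_false] at hkv
    rcases hkv with rfl | rfl | rfl | rfl | rfl | rfl | rfl <;>
      dsimp only <;>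
      first
        | exact hnd.filter _
        | (split
           · first | exact PySem.Set.nodup_diff (hnd.filter _) | exact PySem.Set.nodup_diff _ (hnd.filter _) | exact PySem.Set.nodup_diff _ _ (hnd.filter _)
           · exact hnd.filter _)
  · apply key
    intro kv hkv
    have hkv' := List.mem_of_mem_filter hkv
    simp only [List.mem_cons, List.not_mem_nil, or_false] at hkv'
    rcases hkv' with rfl | rfl | rfl | rfl | rfl | rfl | rfl <;>
      dsimp only <;>
      first
        | exact hnd.filter _
        | (split
           · first | exact PySem.Set.nodup_diff (hnd.filter _) | exact PySem.Set.nodup_diff _ (hnd.filter _) | exact PySem.Set.nodup_diff _ _ (hnd.filter _)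
           · exact hnd.filter _)
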